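-- pv_equiv track=rewrite | github.com/Omnirelm/scout | orchestrator/src/integrations/logs/parsers.py | extract_trace_id_span_id
-- ===== SOURCE A (Python) =====
-- from typing import Dict, Any, Optional, Tuple
--
-- def extract_trace_id_span_id(data: Dict[str, Any], case_sensitive: bool = False) -> Tuple[Optional[str], Optional[str]]:
--     """
--     Extract traceId and spanId from a dictionary, handling multiple field name variations.
--
--     Args:
--         data: Dictionary to search
--         case_sensitive: If False, perform case-insensitive matching
--
--     Returns:
--         Tuple of (traceId, spanId) or (None, None) if not found
--     """
--     trace_id_variations = ['traceId', 'traceID', 'trace_id', 'TraceId', 'TRACE_ID', 'traceid']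
--     span_id_variations = ['spanId', 'spanID', 'span_id', 'SpanId', 'SPAN_ID', 'spanid']
--
--     trace_id = None
--     span_id = None
--
--     if case_sensitive:
--         # Direct lookup
--         for var in trace_id_variations:
--             if var in data:
--                 trace_id = data[var]
--                 break
--
--         for var in span_id_variations:
--             if var in data:
--                 span_id = data[var]
--                 break
--     else:
--         # Case-insensitive lookup
--         data_lower = {k.lower(): v for k, v in data.items()}
--
--         for var in trace_id_variations:
--             if var.lower() in data_lower:
--                 # Get original key to preserve case
--                 try:
--                     original_key = next(k for k in data.keys() if k.lower() == var.lower())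
--                     trace_id = data[original_key]
--                     break
--                 except StopIteration:
--                     continue
--
--         for var in span_id_variations:
--             if var.lower() in data_lower:
--                 try:
--                     original_key = next(k for k in data.keys() if k.lower() == var.lower())
--                     span_id = data[original_key]
--                     break
--                 except StopIteration:
--                     continue
--
--     # Convert to string if not None
--     if trace_id is not None:
--         trace_id = str(trace_id)
--     if span_id is not None:
--         span_id = str(span_id)
--
--     return trace_id, span_id
-- ===== SOURCE B (Python) =====
-- from typing import Dict, Any, Optional, Tuple
--
-- def extract_trace_id_span_id(data: Dict[str, Any], case_sensitive: bool = False) -> Tuple[Optional[str], Optional[str]]: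
--     trace_id_variations = ['traceId', 'traceID', 'trace_id', 'TraceId', 'TRACE_ID', 'traceid']
--     span_id_variations = ['spanId', 'spanID', 'span_id', 'SpanId', 'SPAN_ID', 'spanid']
--
--     def rank(variations, key):
--         # precedence of this key: index of the first variation it matches, else None
--         for i, var in enumerate(variations):
--             if (var == key) if case_sensitive else (var.lower() == key.lower()):
--                 return i
--         return None
--
--     best_trace = None  # (rank, value) of the best-ranked key seen so far (earliest key wins ties)
--     best_span = None
--     for key, value in data.items():
--         rt = rank(trace_id_variations, key)
--         if rt is not None and (best_trace is None or rt < best_trace[0]):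
--             best_trace = (rt, value)
--         rs = rank(span_id_variations, key)
--         if rs is not None and (best_span is None or rs < best_span[0]):
--             best_span = (rs, value)
--
--     return (str(best_trace[1]) if best_trace is not None else None,
--             str(best_span[1]) if best_span is not None else None)
-- ===== Notes on version B (the rewrite author's own statement) =====
-- stated objective: alternative
-- what changed: B inverts the traversal: instead of A's variation-driven lookups (a lowered-key dict plus a per-variation next() rescan of the keys), B makes one data-driven pass over the items, ranks each key by the first variation it matches, and keeps the best-ranked (earliest on ties) value per field.
import Mathlib
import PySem

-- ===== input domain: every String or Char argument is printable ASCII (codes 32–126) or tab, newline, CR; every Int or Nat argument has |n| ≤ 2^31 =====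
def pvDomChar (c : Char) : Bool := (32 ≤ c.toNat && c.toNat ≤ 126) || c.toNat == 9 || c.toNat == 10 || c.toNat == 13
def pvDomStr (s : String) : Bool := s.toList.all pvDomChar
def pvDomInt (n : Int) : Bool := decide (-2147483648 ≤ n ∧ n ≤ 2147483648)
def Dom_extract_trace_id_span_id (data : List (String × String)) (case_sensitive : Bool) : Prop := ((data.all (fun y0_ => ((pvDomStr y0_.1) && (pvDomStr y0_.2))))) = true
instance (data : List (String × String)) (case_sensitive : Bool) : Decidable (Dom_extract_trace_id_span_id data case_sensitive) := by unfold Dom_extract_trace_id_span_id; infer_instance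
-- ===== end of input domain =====

-- B replaces A's variation-driven lookups (lowered-key dict + per-variation key rescans) with one
-- data-driven pass that ranks each key by the first variation it matches and keeps the best rank per field.


-- ===== PORT A =====
def pvTraceVars : List String := ["traceId", "traceID", "trace_id", "TraceId", "TRACE_ID", "traceid"]
def pvSpanVars : List String := ["spanId", "spanID", "span_id", "SpanId", "SPAN_ID", "spanid"]

-- case-sensitive loop: "for var in variations: if var in data: result = data[var]; break"
def pvLookupSensA (data : List (String × String)) : List String → Option String
  | [] => none
  | v :: rest =>
    if ((PySem.Dict.mk data).get? v).isSome then (PySem.Dict.mk data).get? v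
    else pvLookupSensA data rest

-- data_lower = {k.lower(): v for k, v in data.items()}
def pvDataLowerA (data : List (String × String)) : PySem.Dict String String :=
  data.foldl (fun d kv => d.insert (PySem.Str.lower kv.1) kv.2) PySem.Dict.empty

-- case-insensitive loop: membership in data_lower, then next(k for k in data.keys() if k.lower() == var.lower()),
-- result = data[original_key]; StopIteration → continue
def pvLookupInsensA (data : List (String × String)) (dlow : PySem.Dict String String) : List String → Option String
  | [] => none
  | v :: rest =>
    if (dlow.get? (PySem.Str.lower v)).isSome then
      match data.find? (fun kv => PySem.Str.lower kv.1 == PySem.Str.lower v) with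
      | some kv => (PySem.Dict.mk data).get? kv.1
      | none => pvLookupInsensA data dlow rest
    else pvLookupInsensA data dlow rest

-- str(x) on a string is the identity, so the final conversion is a no-op for String values
def extract_trace_id_span_id (data : List (String × String)) (case_sensitive : Bool) : Option String × Option String :=
  if case_sensitive then
    (pvLookupSensA data pvTraceVars, pvLookupSensA data pvSpanVars)
  else
    let dlow := pvDataLowerA data
    (pvLookupInsensA data dlow pvTraceVars, pvLookupInsensA data dlow pvSpanVars)

-- ===== PORT B =====
-- Source B's rank(): index of the first variation this key matches, else none
def pvRankB (case_sensitive : Bool) (key : String) : Nat → List String → Option Nat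
  | _, [] => none
  | i, v :: vs =>
    if (if case_sensitive then v == key else PySem.Str.lower v == PySem.Str.lower key)
    then some i else pvRankB case_sensitive key (i + 1) vs

-- one field's update inside the loop body: keep the best-ranked match (earliest key wins ties)
def pvStepB (case_sensitive : Bool) (vars : List String)
    (best : Option (Nat × String)) (kv : String × String) : Option (Nat × String) :=
  match pvRankB case_sensitive kv.1 0 vars with
  | none => best
  | some r =>
    match best with
    | none => some (r, kv.2)
    | some (br, bv) => if r < br then some (r, kv.2) else some (br, bv)

def extract_trace_id_span_id_alt (data : List (String × String)) (case_sensitive : Bool) : Option String × Option String :=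
  let res := data.foldl
    (fun (b : Option (Nat × String) × Option (Nat × String)) kv =>
      (pvStepB case_sensitive pvTraceVars b.1 kv, pvStepB case_sensitive pvSpanVars b.2 kv))
    (none, none)
  (res.1.map (·.2), res.2.map (·.2))

-- ===== PRECONDITION & SPEC =====
def Spec_extract_trace_id_span_id (data : List (String × String)) (case_sensitive : Bool) (out : Option String × Option String) : Prop := out = extract_trace_id_span_id_alt data case_sensitive
instance (data : List (String × String)) (case_sensitive : Bool) (out : Option String × Option String) : Decidable (Spec_extract_trace_id_span_id data case_sensitive out) := by unfold Spec_extract_trace_id_span_id; infer_instance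

-- ===== CLAIM (what is proved, stated in full; the proofs are below) =====
def Claim_equal_extract_trace_id_span_id : Prop := ∀ (data : List (String × String)) (case_sensitive : Bool), Dom_extract_trace_id_span_id data case_sensitive → Spec_extract_trace_id_span_id data case_sensitive (extract_trace_id_span_id data case_sensitive)

-- ===== LEMMAS AND PROOFS =====

-- the key predicate both sides test, in B's orientation (variation first)
def pvP (cs : Bool) (v k : String) : Bool :=
  if cs then v == k else PySem.Str.lower v == PySem.Str.lower k

-- variation-driven scan carrying the variation index: the common middle form
def pvPickI (cs : Bool) (L : List (String × String)) : Nat → List String → Option (Nat × String)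
  | _, [] => none
  | i, v :: vs =>
    match L.find? (fun kv => pvP cs v kv.1) with
    | some kv => some (i, kv.2)
    | none => pvPickI cs L (i + 1) vs

-- data-driven right-fold form of B's best
def pvBestF (cs : Bool) (vars : List String) : List (String × String) → Option (Nat × String)
  | [] => none
  | kv :: L =>
    match pvRankB cs kv.1 0 vars with
    | none => pvBestF cs vars L
    | some r =>
      match pvBestF cs vars L with
      | none => some (r, kv.2)
      | some (br, bv) => if br < r then some (br, bv) else some (r, kv.2)

def pvMerge (a b : Option (Nat × String)) : Option (Nat × String) :=
  match a, b with
  | none, b => b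
  | a, none => a
  | some (ar, av), some (br, bv) => if br < ar then some (br, bv) else some (ar, av)

theorem pvRankB_unfold (cs : Bool) (k : String) (i : Nat) (v : String) (vs : List String) :
    pvRankB cs k i (v :: vs) = if pvP cs v k then some i else pvRankB cs k (i + 1) vs := by
  simp [pvRankB, pvP]

theorem pvRankB_ge (cs : Bool) (k : String) (vs : List String) :
    ∀ i r, pvRankB cs k i vs = some r → i ≤ r := by
  induction vs with
  | nil => intro i r h; simp [pvRankB] at h
  | cons v vs ih =>
    intro i r h
    rw [pvRankB_unfold] at h
    by_cases hp : pvP cs v k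
    · simp [hp] at h; omega
    · simp [hp] at h; have := ih (i + 1) r h; omega

theorem pvPickI_ge (cs : Bool) (L : List (String × String)) (vs : List String) :
    ∀ i r x, pvPickI cs L i vs = some (r, x) → i ≤ r := by
  induction vs with
  | nil => intro i r x h; simp [pvPickI] at h
  | cons v vs ih =>
    intro i r x h
    simp only [pvPickI] at h
    cases hf : L.find? (fun kv => pvP cs v kv.1) with
    | some kv => rw [hf] at h; simp at h; omega
    | none => rw [hf] at h; have := ih (i + 1) r x h; omega

theorem pvPickI_nil (cs : Bool) (vs : List String) (i : Nat) :
    pvPickI cs [] i vs = none := by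
  induction vs generalizing i with
  | nil => rfl
  | cons v vs ih => simp [pvPickI, ih]

-- cons rule of the variation scan: first item kv competes against the scan over the tail
theorem pvPickI_unfold (cs : Bool) (L : List (String × String)) (i : Nat) (v : String) (vs : List String) :
    pvPickI cs L i (v :: vs) =
      (match L.find? (fun kv => pvP cs v kv.1) with
       | some kv => some (i, kv.2)
       | none => pvPickI cs L (i + 1) vs) := rfl

-- cons rule of the variation scan: first item kv competes against the scan over the tail
theorem pvPickI_cons (cs : Bool) (kv : String × String) (L : List (String × String))
    (vs : List String) (i : Nat) :
    pvPickI cs (kv :: L) i vs =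
      (match pvRankB cs kv.1 i vs with
       | none => pvPickI cs L i vs
       | some r =>
         match pvPickI cs L i vs with
         | none => some (r, kv.2)
         | some (br, bv) => if br < r then some (br, bv) else some (r, kv.2)) := by
  induction vs generalizing i with
  | nil => simp [pvPickI, pvRankB]
  | cons v vs ih =>
    rw [pvRankB_unfold]
    by_cases hp : pvP cs v kv.1
    · have hfind : (kv :: L).find? (fun kv' => pvP cs v kv'.1) = some kv := by
        simp [List.find?, hp]
      rw [pvPickI_unfold, hfind, if_pos hp]
      cases hrest : pvPickI cs L i (v :: vs) with
      | none => rfl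
      | some p =>
        obtain ⟨br, bv⟩ := p
        have := pvPickI_ge cs L (v :: vs) i br bv hrest
        simp only []
        rw [if_neg (by omega)]
    · have hfind : (kv :: L).find? (fun kv' => pvP cs v kv'.1) = L.find? (fun kv' => pvP cs v kv'.1) := by
        simp [List.find?, hp]
      rw [pvPickI_unfold, hfind, if_neg hp, pvPickI_unfold cs L]
      cases hf : L.find? (fun kv' => pvP cs v kv'.1) with
      | some kv' =>
        cases hr : pvRankB cs kv.1 (i + 1) vs with
        | none => rfl
        | some r =>
          have := pvRankB_ge cs kv.1 vs (i + 1) r hr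
          simp only []
          rw [if_pos (by omega)]
      | none => exact ih (i + 1)

theorem pvPickI_eq_bestF (cs : Bool) (vars : List String) (L : List (String × String)) :
    pvPickI cs L 0 vars = pvBestF cs vars L := by
  induction L with
  | nil => simp [pvBestF, pvPickI_nil]
  | cons kv L ih => rw [pvPickI_cons, pvBestF, ih]

-- the left fold of B computes pvBestF, merged with the accumulator (accumulator wins ties)
theorem pvFoldl_eq_merge_bestF (cs : Bool) (vars : List String) (L : List (String × String)) :
    ∀ acc, L.foldl (pvStepB cs vars) acc = pvMerge acc (pvBestF cs vars L) := by
  induction L with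
  | nil => intro acc; cases acc <;> simp [pvMerge, pvBestF]
  | cons kv L ih =>
    intro acc
    rw [List.foldl_cons, ih, pvBestF]
    unfold pvStepB
    cases hr : pvRankB cs kv.1 0 vars with
    | none => rfl
    | some r =>
      cases acc with
      | none =>
        cases hb : pvBestF cs vars L with
        | none => rfl
        | some p =>
          obtain ⟨br, bv⟩ := p
          simp [pvMerge]
      | some a =>
        obtain ⟨ar, av⟩ := a
        cases hb : pvBestF cs vars L with
        | none => simp only [pvMerge]; split_ifs <;> rfl
        | some p =>
          obtain ⟨br, bv⟩ := p
          by_cases h1 : r < ar <;> by_cases h2 : br < r <;> by_cases h3 : br < ar <;>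
            simp [pvMerge, h1, h2, h3] <;> first | rfl | omega

theorem pvFieldB (cs : Bool) (vars : List String) (data : List (String × String)) :
    (data.foldl (pvStepB cs vars) none).map (·.2) = (pvPickI cs data 0 vars).map (·.2) := by
  rw [pvFoldl_eq_merge_bestF, pvPickI_eq_bestF]
  cases pvBestF cs vars data <;> rfl

-- A's case-sensitive scan is the variation scan (the index is decoration)
theorem pvSens_eq_pickI (data : List (String × String)) (vs : List String) :
    ∀ i, pvLookupSensA data vs = (pvPickI true data i vs).map (·.2) := by
  induction vs with
  | nil => intro i; rfl
  | cons v vs ih =>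
    intro i
    simp only [pvLookupSensA, pvPickI]
    have hpred : (fun kv : String × String => pvP true v kv.1) = (fun p : String × String => p.1 == v) := by
      funext kv; simp [pvP, Bool.beq_comm]
    rw [hpred]
    cases hf : data.find? (fun p : String × String => p.1 == v) with
    | some kv => simp [PySem.Dict.get?, hf]
    | none => simp [PySem.Dict.get?, hf, ih (i + 1)]

-- A's data_lower membership agrees with the existence of a lowered-key match
theorem dataLower_isSome (data : List (String × String)) (acc : PySem.Dict String String) (t : String) :
    ((data.foldl (fun d kv => d.insert (PySem.Str.lower kv.1) kv.2) acc).get? t).isSome =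
      ((acc.get? t).isSome || (data.find? (fun kv => PySem.Str.lower kv.1 == t)).isSome) := by
  induction data generalizing acc with
  | nil => simp
  | cons kv rest ih =>
    simp only [List.foldl_cons, List.find?, ih]
    by_cases ht : PySem.Str.lower kv.1 = t
    · subst ht
      simp [PySem.Dict.get?_insert_self]
    · have hbeq : (PySem.Str.lower kv.1 == t) = false := by simpa using ht
      simp [PySem.Dict.get?_insert, Ne.symm ht, hbeq]

-- looking the found key back up in data returns the found pair's value
theorem lookup_found_key (data : List (String × String)) (t : String) (kv : String × String)
    (h : data.find? (fun kv => PySem.Str.lower kv.1 == t) = some kv) :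
    (PySem.Dict.mk data).get? kv.1 = some kv.2 := by
  induction data with
  | nil => simp at h
  | cons p rest ih =>
    obtain ⟨k, x⟩ := p
    simp only [List.find?] at h
    by_cases hp : PySem.Str.lower k = t
    · have : (PySem.Str.lower (k, x).1 == t) = true := by simpa using hp
      rw [this] at h
      cases h
      simp [PySem.Dict.get?_mk_cons]
    · have hbeq : (PySem.Str.lower (k, x).1 == t) = false := by simpa using hp
      rw [hbeq] at h
      have hkv := List.find?_some h
      have hkvl : PySem.Str.lower kv.1 = t := by simpa using hkv
      have hne : (k == kv.1) = false := by
        simp only [beq_eq_false_iff_ne, ne_eq]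
        intro he; exact hp (he ▸ hkvl)
      rw [PySem.Dict.get?_mk_cons, hne]
      · exact ih h

-- A's case-insensitive scan is the variation scan
theorem pvInsens_eq_pickI (data : List (String × String)) (vs : List String) :
    ∀ i, pvLookupInsensA data (pvDataLowerA data) vs = (pvPickI false data i vs).map (·.2) := by
  induction vs with
  | nil => intro i; rfl
  | cons v vs ih =>
    intro i
    simp only [pvLookupInsensA, pvPickI]
    have hlow := dataLower_isSome data PySem.Dict.empty (PySem.Str.lower v)
    simp only [PySem.Dict.get?_empty, Option.isSome_none, Bool.false_or] at hlow
    unfold pvDataLowerA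
    rw [hlow]
    have hpred : (fun kv : String × String => pvP false v kv.1)
        = (fun kv : String × String => PySem.Str.lower kv.1 == PySem.Str.lower v) := by
      funext kv; simp [pvP, Bool.beq_comm]
    rw [hpred]
    cases hf : data.find? (fun kv : String × String => PySem.Str.lower kv.1 == PySem.Str.lower v) with
    | some kv =>
      simp only [Option.isSome_some, if_true]
      simp [lookup_found_key data _ kv hf]
    | none =>
      simp only [Option.isSome_none]
      simpa [pvDataLowerA] using ih (i + 1)

-- splitting the paired fold into its two components
theorem pvFoldl_pair (cs : Bool) (L : List (String × String)) :
    ∀ (a b : Option (Nat × String)),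
      L.foldl (fun (p : Option (Nat × String) × Option (Nat × String)) kv =>
        (pvStepB cs pvTraceVars p.1 kv, pvStepB cs pvSpanVars p.2 kv)) (a, b)
      = (L.foldl (pvStepB cs pvTraceVars) a, L.foldl (pvStepB cs pvSpanVars) b) := by
  induction L with
  | nil => intro a b; rfl
  | cons kv L ih => intro a b; simp [List.foldl_cons, ih]

-- ===== VERDICT (by name: the statement is the Claim_ definition above) =====
theorem extract_trace_id_span_id_spec : Claim_equal_extract_trace_id_span_id := by
  intro data case_sensitive _
  unfold Spec_extract_trace_id_span_id extract_trace_id_span_id extract_trace_id_span_id_alt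
  rw [pvFoldl_pair]
  cases case_sensitive with
  | true =>
    simp only [if_true]
    rw [pvSens_eq_pickI data pvTraceVars 0, pvSens_eq_pickI data pvSpanVars 0,
        ← pvFieldB, ← pvFieldB]
  | false =>
    simp only [Bool.false_eq_true, if_false]
    rw [pvInsens_eq_pickI data pvTraceVars 0, pvInsens_eq_pickI data pvSpanVars 0,
        ← pvFieldB, ← pvFieldB]
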